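-- pv_equiv track=rewrite | github.com/itsjustsandzz/dee_tee_train | MP-SPDZ/Compiler/dt_unit_tests_util.py | GroupSum_plain
-- ===== SOURCE A (Python) =====
-- def GroupSum_plain (g_plain, x_plain):
--     ans = []
--     sum_so_far = 0
--     for i in range(len(x_plain)):
--         if g_plain[i] == 1:
--             sum_so_far = x_plain[i]
--         else:
--             sum_so_far = sum_so_far + x_plain[i]
--         ans.append(sum_so_far)
--     for i in range(len(g_plain)-2, -1, -1):
--         if g_plain[i+1] == 0:
--             ans[i] = ans[i+1]
--     return ans
-- ===== SOURCE B (Python) =====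
-- def GroupSum_plain(g_plain, x_plain):
--     pairs = list(zip(g_plain, x_plain))
--     if not pairs:
--         return []
--     out = []
--     g0, x0 = pairs[0]
--     run = x0 if g0 == 1 else 0 + x0
--     pending = 1
--     for gv, xv in pairs[1:]:
--         if gv == 0:
--             run += xv
--             pending += 1
--         else:
--             out.extend([run] * pending)
--             run = xv if gv == 1 else run + xv
--             pending = 1
--     out.extend([run] * pending)
--     return out
-- ===== Notes on version B (the rewrite author's own statement) =====
-- stated objective: alternative
-- what changed: B makes one forward pass that delimits each maximal group (start, then run of g==0) and emits the group's final running sum for the whole block at once, instead of A's within-group prefix sums followed by a backward index loop that overwrites entries in place.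
import Mathlib
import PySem

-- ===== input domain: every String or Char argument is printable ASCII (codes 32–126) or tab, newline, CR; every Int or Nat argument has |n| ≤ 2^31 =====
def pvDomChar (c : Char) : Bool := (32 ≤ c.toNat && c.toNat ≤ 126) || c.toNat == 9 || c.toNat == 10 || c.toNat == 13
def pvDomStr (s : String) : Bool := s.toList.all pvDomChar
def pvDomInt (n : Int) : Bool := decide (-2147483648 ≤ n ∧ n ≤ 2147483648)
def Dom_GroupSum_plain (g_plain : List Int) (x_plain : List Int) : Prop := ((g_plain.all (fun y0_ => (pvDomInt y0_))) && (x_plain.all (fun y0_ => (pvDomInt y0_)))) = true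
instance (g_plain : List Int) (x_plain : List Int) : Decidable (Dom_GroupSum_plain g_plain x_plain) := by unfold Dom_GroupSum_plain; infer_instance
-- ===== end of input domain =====

-- B makes one forward pass over the zipped lists, emitting each maximal group's total once when the
-- group closes; A builds within-group prefix sums, then overwrites entries in a backward index loop.

-- ===== PORT A =====
def GroupSum_plain (g_plain : List Int) (x_plain : List Int) : List Int :=
  -- for i in range(len(x_plain)): build (ans, sum_so_far)
  let fwd := (PySem.List.pyRange 0 (x_plain.length : Int) 1).foldl
    (fun (st : List Int × Int) i =>
      let s := if PySem.List.pyGetD g_plain i 0 == 1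
               then PySem.List.pyGetD x_plain i 0
               else st.2 + PySem.List.pyGetD x_plain i 0
      (st.1 ++ [s], s)) ([], 0)
  -- for i in range(len(g_plain)-2, -1, -1): if g_plain[i+1] == 0: ans[i] = ans[i+1]
  -- (indexing via total pyGetD/pySetD; Pre_ keeps every access in range, exactly where the Python returns)
  (PySem.List.pyRange ((g_plain.length : Int) - 2) (-1) (-1)).foldl
    (fun ans i =>
      if PySem.List.pyGetD g_plain (i + 1) 0 == 0
      then PySem.List.pySetD ans i (PySem.List.pyGetD ans (i + 1) 0)
      else ans) fwd.1

-- ===== PORT B =====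
-- the 'for gv, xv in pairs[1:]' loop: out, the current group's running sum, the pending group length
def altLoop : List (Int × Int) → List Int → Int → Nat → List Int
  | [], out, run, pending => out ++ List.replicate pending run
  | q :: qs, out, run, pending =>
    if q.1 == 0 then altLoop qs out (run + q.2) (pending + 1)
    else altLoop qs (out ++ List.replicate pending run)
           (if q.1 == 1 then q.2 else run + q.2) 1

def GroupSum_plain_alt (g_plain : List Int) (x_plain : List Int) : List Int :=
  match g_plain.zip x_plain with
  | [] => []
  | p :: rest => altLoop rest [] (if p.1 == 1 then p.2 else 0 + p.2) 1

-- ===== PRECONDITION & SPEC =====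
-- Pre_ holds exactly where the Python A returns normally: A raises IndexError when
-- len(x) > len(g) (forward loop), or when some g value at an index ≥ max(len(x),1)
-- is 0 (the backward loop then indexes ans out of range).
def Pre_GroupSum_plain (g_plain : List Int) (x_plain : List Int) : Prop :=
  x_plain.length ≤ g_plain.length ∧
    ((g_plain.drop (max x_plain.length 1)).all (fun v => v != 0)) = true

instance (g_plain : List Int) (x_plain : List Int) : Decidable (Pre_GroupSum_plain g_plain x_plain) := by
  unfold Pre_GroupSum_plain; infer_instance

def pvWitness_GroupSum_plain : List Int × List Int := ([1, 0, 0, 1, 0], [3, 4, 5, 6, 7])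

def Spec_GroupSum_plain (g_plain : List Int) (x_plain : List Int) (out : List Int) : Prop :=
  out = GroupSum_plain_alt g_plain x_plain

instance (g_plain : List Int) (x_plain : List Int) (out : List Int) : Decidable (Spec_GroupSum_plain g_plain x_plain out) := by
  unfold Spec_GroupSum_plain; infer_instance

-- ===== CLAIM (what is proved, stated in full; the proofs are below) =====
def Claim_equal_GroupSum_plain : Prop := ∀ (g_plain : List Int) (x_plain : List Int), Dom_GroupSum_plain g_plain x_plain → Pre_GroupSum_plain g_plain x_plain → Spec_GroupSum_plain g_plain x_plain (GroupSum_plain g_plain x_plain)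

-- ===== LEMMAS AND PROOFS =====

def scanA : List (Int × Int) → Int → List Int
  | [], _ => []
  | q :: r, s =>
    let s' := if q.1 == 1 then q.2 else s + q.2
    s' :: scanA r s'

def sfin (l : List (Int × Int)) (s : Int) : Int :=
  l.foldl (fun s q => if q.1 == 1 then q.2 else s + q.2) s

def altSplit : List (Int × Int) → List (Int × Int) × List (Int × Int)
  | [] => ([], [])
  | q :: qs =>
    if q.1 == 0 then
      let br := altSplit qs
      (q :: br.1, br.2)
    else ([], q :: qs)

theorem altSplit_rest_length_le (l : List (Int × Int)) : (altSplit l).2.length ≤ l.length := by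
  induction l with
  | nil => simp [altSplit]
  | cons q qs ih =>
    simp only [altSplit]
    split
    · simpa using Nat.le_succ_of_le ih
    · simp

theorem altSplit_append (l : List (Int × Int)) : (altSplit l).1 ++ (altSplit l).2 = l := by
  induction l with
  | nil => simp [altSplit]
  | cons q qs ih =>
    simp only [altSplit]
    split
    · simpa using ih
    · simp

theorem altSplit_len (l : List (Int × Int)) : (altSplit l).1.length + (altSplit l).2.length = l.length := by
  have := congrArg List.length (altSplit_append l); simpa using this

theorem altSplit_fst_zero (l : List (Int × Int)) : ∀ q ∈ (altSplit l).1, q.1 = 0 := by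
  induction l with
  | nil => simp [altSplit]
  | cons q qs ih =>
    simp only [altSplit]
    split
    · next h =>
      intro p hp
      rcases List.mem_cons.mp hp with rfl | hp'
      · exact beq_iff_eq.mp h
      · exact ih p hp'
    · simp

theorem altSplit_rest_head (l : List (Int × Int)) :
    (altSplit l).2 = [] ∨ ∃ q qs, (altSplit l).2 = q :: qs ∧ q.1 ≠ 0 := by
  induction l with
  | nil => simp [altSplit]
  | cons q qs ih =>
    simp only [altSplit]
    split
    · next h => simpa using ih
    · next h => exact Or.inr ⟨q, qs, rfl, by simpa using h⟩

def gsum : List (Int × Int) → Int → List Int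
  | [], _ => []
  | p :: rest, run =>
    let br := altSplit rest
    let run' := sfin (p :: br.1) run
    List.replicate (1 + br.1.length) run' ++ gsum br.2 run'
termination_by l _ => l.length
decreasing_by
  exact Nat.lt_succ_of_le (altSplit_rest_length_le rest)

theorem gsum_length_aux (n : Nat) : ∀ (l : List (Int × Int)) (s : Int), l.length ≤ n → (gsum l s).length = l.length := by
  induction n with
  | zero =>
    intro l s hl
    have : l = [] := List.eq_nil_of_length_eq_zero (by omega)
    subst this; simp [gsum]
  | succ n ih =>
    intro l s hl
    cases l with
    | nil => simp [gsum]
    | cons p rest =>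
      rw [gsum]
      have h1 := altSplit_len rest
      have hr : rest.length ≤ n := by simpa using Nat.lt_succ_iff.mp (Nat.lt_of_lt_of_le (by simp) hl)
      have h2 := ih (altSplit rest).2 (sfin (p :: (altSplit rest).1) s) (le_trans (altSplit_rest_length_le rest) hr)
      simp only [List.length_append, List.length_replicate, h2]
      simp only [List.length_cons]
      omega

theorem gsum_length (l : List (Int × Int)) (s : Int) : (gsum l s).length = l.length :=
  gsum_length_aux l.length l s le_rfl

def Ok (pairs : List (Int × Int)) (s : Int) (res : List Int) : Prop :=
  res.length = pairs.length ∧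
  ∀ i : Nat, res[i]? =
    if (pairs[i + 1]?).map Prod.fst = some 0 then res[i + 1]? else (scanA pairs s)[i]?

theorem scanA_length (l : List (Int × Int)) (s : Int) : (scanA l s).length = l.length := by
  induction l generalizing s with
  | nil => simp [scanA]
  | cons q r ih => simp [scanA, ih]

theorem scanA_append (a b : List (Int × Int)) (s : Int) :
    scanA (a ++ b) s = scanA a s ++ scanA b (sfin a s) := by
  induction a generalizing s with
  | nil => simp [scanA, sfin]
  | cons q r ih => simp [scanA, sfin, ih, List.foldl_cons]

theorem scanA_last (l : List (Int × Int)) (s : Int) (h : l ≠ []) :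
    (scanA l s)[l.length - 1]? = some (sfin l s) := by
  induction l generalizing s with
  | nil => simp at h
  | cons q r ih =>
    cases r with
    | nil => simp [scanA, sfin]
    | cons q' r' =>
      have := ih (s := if q.1 == 1 then q.2 else s + q.2) (by simp)
      simpa [scanA, sfin, List.foldl_cons] using this

theorem Ok_unique (pairs : List (Int × Int)) (s : Int) (r1 r2 : List Int)
    (h1 : Ok pairs s r1) (h2 : Ok pairs s r2) : r1 = r2 := by
  obtain ⟨hl1, hr1⟩ := h1
  obtain ⟨hl2, hr2⟩ := h2
  have key : ∀ d i, pairs.length - i ≤ d → r1[i]? = r2[i]? := by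
    intro d
    induction d with
    | zero =>
      intro i hi
      rw [List.getElem?_eq_none (by omega), List.getElem?_eq_none (by omega)]
    | succ d ih =>
      intro i hi
      rw [hr1 i, hr2 i]
      split
      · next hcond =>
        have hlt : i + 1 < pairs.length := by
          rcases Option.map_eq_some_iff.mp hcond with ⟨q, hq, _⟩
          exact List.getElem?_eq_some_iff.mp hq |>.1
        exact ih (i + 1) (by omega)
      · rfl
  apply List.ext_getElem?
  intro i
  exact key (pairs.length - i) i le_rfl

theorem Ok_gsum_aux (n : Nat) : ∀ (l : List (Int × Int)) (s : Int), l.length ≤ n →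
    ∀ i : Nat, (gsum l s)[i]? =
      if (l[i + 1]?).map Prod.fst = some 0 then (gsum l s)[i + 1]? else (scanA l s)[i]? := by
  induction n with
  | zero =>
    intro l s hl i
    have : l = [] := List.eq_nil_of_length_eq_zero (by omega)
    subst this; simp [gsum, scanA]
  | succ n ih =>
    intro l s hl i
    cases l with
    | nil => simp [gsum, scanA]
    | cons p rest =>
      have hr : rest.length ≤ n := by
        simp only [List.length_cons] at hl; omega
      set b := (altSplit rest).1 with hb
      set r := (altSplit rest).2 with hrr
      have hsplit : b ++ r = rest := altSplit_append rest
      have hlenbr : b.length + r.length = rest.length := altSplit_len rest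
      set blk : List (Int × Int) := p :: b with hblk
      set run' := sfin blk s with hrun
      have hek : gsum (p :: rest) s = List.replicate (1 + b.length) run' ++ gsum r run' := by
        rw [gsum]
      have hpair : p :: rest = blk ++ r := by
        rw [hblk]; simp [hsplit]
      have hscan : scanA (p :: rest) s = scanA blk s ++ scanA r run' := by
        rw [hpair, scanA_append]
      set k := 1 + b.length with hk
      have hblklen : blk.length = k := by simp [hblk, hk, Nat.add_comm]
      have hres' : (gsum r run').length = r.length := gsum_length r run'
      have hscan2 : scanA (blk ++ r) s = scanA blk s ++ scanA r run' := by
        rw [scanA_append, ← hrun]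
      rcases Nat.lt_trichotomy (i + 1) k with hik | hik | hik
      · -- inside the block, next is a flag-0 pair
        have hib : i < b.length := by omega
        have hcond : ((blk ++ r)[i + 1]?).map Prod.fst = some 0 := by
          rw [List.getElem?_append_left (by omega)]
          rw [hblk, List.getElem?_cons_succ, List.getElem?_eq_getElem hib]
          simp [altSplit_fst_zero rest _ (List.getElem_mem hib)]
        rw [hek, hpair, hcond, if_pos rfl]
        rw [List.getElem?_append_left (by simp only [List.length_replicate]; omega),
            List.getElem?_append_left (by simp only [List.length_replicate]; omega),
            List.getElem?_replicate, List.getElem?_replicate,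
            if_pos (by omega), if_pos (by omega)]
      · -- last element of the block
        have hcond : ¬ (((blk ++ r)[i + 1]?).map Prod.fst = some 0) := by
          rw [List.getElem?_append_right (by omega), hblklen, hik, Nat.sub_self]
          rcases altSplit_rest_head rest with h0 | ⟨q, qs, heq, hq⟩
          · rw [hrr, h0]; simp
          · rw [hrr, heq]; simpa using hq
        rw [hek, hpair, if_neg hcond, hscan2]
        rw [List.getElem?_append_left (by simp only [List.length_replicate]; omega),
            List.getElem?_append_left (by rw [scanA_length, hblklen]; omega),
            List.getElem?_replicate, if_pos (by omega)]
        have hi : i = blk.length - 1 := by omega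
        rw [hi, scanA_last blk s (by simp [hblk]), hrun]
      · -- past the block: use the IH on r
        have hkle : k ≤ i := by omega
        have hrn : r.length ≤ n := by omega
        have IH := ih r run' hrn (i - k)
        have e1 : i - k + 1 = i + 1 - k := by omega
        rw [hek, hpair, hscan2]
        rw [List.getElem?_append_right (l₁ := List.replicate k run') (by simp only [List.length_replicate]; omega),
            List.getElem?_append_right (l₁ := List.replicate k run') (by simp only [List.length_replicate]; omega),
            List.getElem?_append_right (l₁ := blk) (by omega),
            List.getElem?_append_right (l₁ := scanA blk s) (by rw [scanA_length, hblklen]; omega)]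
        simp only [List.length_replicate, hblklen, scanA_length]
        rw [← e1]
        exact IH

theorem Ok_gsum (l : List (Int × Int)) (s : Int) : Ok l s (gsum l s) :=
  ⟨gsum_length l s, fun i => Ok_gsum_aux l.length l s le_rfl i⟩

theorem zip_pyGetD (g x : List Int) (i : Int) (h0 : 0 ≤ i) (h1 : i < (x.length : Int))
    (hle : x.length ≤ g.length) :
    PySem.List.pyGetD (g.zip x) i (0, 0) = (PySem.List.pyGetD g i 0, PySem.List.pyGetD x i 0) := by
  have hz : (g.zip x).length = x.length := by
    rw [List.length_zip]; omega
  have hi : i.toNat < x.length := by omega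
  rw [PySem.List.pyGetD_eq_getElem _ _ h0 (by omega),
      PySem.List.pyGetD_eq_getElem _ _ h0 (by omega),
      PySem.List.pyGetD_eq_getElem _ _ h0 (by omega)]
  rw [List.getElem_zip]

theorem foldG_scan (l : List (Int × Int)) :
    ∀ (ans : List Int) (s : Int),
    l.foldl (fun (st : List Int × Int) q =>
      let s' := if q.1 == 1 then q.2 else st.2 + q.2
      (st.1 ++ [s'], s')) (ans, s) = (ans ++ scanA l s, sfin l s) := by
  induction l with
  | nil => intro ans s; simp [scanA, sfin]
  | cons q r ih =>
    intro ans s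
    simp only [List.foldl_cons]
    rw [ih]
    simp [scanA, sfin]

theorem forward_eq (g x : List Int) (hle : x.length ≤ g.length) :
    ((PySem.List.pyRange 0 (x.length : Int) 1).foldl
      (fun (st : List Int × Int) i =>
        let s := if PySem.List.pyGetD g i 0 == 1
                 then PySem.List.pyGetD x i 0
                 else st.2 + PySem.List.pyGetD x i 0
        (st.1 ++ [s], s)) ([], 0)) = (scanA (g.zip x) 0, sfin (g.zip x) 0) := by
  have hz : ((g.zip x).length : Int) = (x.length : Int) := by
    rw [List.length_zip]; simp; omega
  rw [PySem.List.foldl_congr_mem _ _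
      (fun (st : List Int × Int) i =>
        let q := PySem.List.pyGetD (g.zip x) i (0, 0)
        let s' := if q.1 == 1 then q.2 else st.2 + q.2
        (st.1 ++ [s'], s')) _
      (by
        intro acc i hi
        obtain ⟨h0, h1⟩ := PySem.List.mem_pyRange_one.mp hi
        simp only [zip_pyGetD g x i h0 h1 hle])]
  rw [← hz]
  rw [PySem.List.foldl_pyRange_zero_pyGetD' (g.zip x) (0, 0)
      (fun (st : List Int × Int) q =>
        let s' := if q.1 == 1 then q.2 else st.2 + q.2
        (st.1 ++ [s'], s')) ([], 0)]
  simpa using foldG_scan (g.zip x) [] 0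

theorem pyGetD_succ (g : List Int) (i : Nat) (h : i + 1 < g.length) :
    PySem.List.pyGetD g ((i : Int) + 1) 0 = g[i + 1] := by
  have e : ((i : Int) + 1).toNat = i + 1 := by omega
  rw [PySem.List.pyGetD_of_nonneg g 0 (by omega), e, List.getD_eq_getElem]

theorem backward_fold_char (g : List Int) (n : Nat)
    (hc : ∀ i : Nat, (i : Int) ≤ (g.length : Int) - 2 →
      PySem.List.pyGetD g ((i : Int) + 1) 0 = 0 → i + 1 < n) :
    ∀ (k : Nat) (m : Int) (ans r : List Int), ans.length = n →
      m = (k : Int) - 1 → m ≤ (g.length : Int) - 2 →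
      r = (PySem.List.pyRange m (-1) (-1)).foldl
        (fun ans i =>
          if PySem.List.pyGetD g (i + 1) 0 == 0
          then PySem.List.pySetD ans i (PySem.List.pyGetD ans (i + 1) 0)
          else ans) ans →
      r.length = n ∧
      (∀ i : Nat, m < (i : Int) → r[i]? = ans[i]?) ∧
      (∀ i : Nat, (i : Int) ≤ m →
        r[i]? = if PySem.List.pyGetD g ((i : Int) + 1) 0 = 0 then r[i + 1]? else ans[i]?) := by
  intro k
  induction k with
  | zero =>
    intro m ans r hlen hm _ hr
    rw [PySem.List.pyRange_neg_one_eq_nil (by omega)] at hr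
    simp only [List.foldl_nil] at hr
    subst hr
    exact ⟨hlen, fun i _ => rfl, fun i hi => absurd hi (by omega)⟩
  | succ k ih =>
    intro m ans r hlen hm hmle hr
    have hm0 : 0 ≤ m := by omega
    rw [PySem.List.pyRange_neg_one_cons (by omega), List.foldl_cons] at hr
    by_cases hcond : PySem.List.pyGetD g (m + 1) 0 = 0
    · -- the step writes ans[m] := ans[m+1]
      have hmn : m.toNat + 1 < n := by
        have := hc m.toNat (by omega) (by
          have : ((m.toNat : Int)) = m := by omega
          rw [this]; exact hcond)
        omega
      have hstep : (if PySem.List.pyGetD g (m + 1) 0 == 0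
          then PySem.List.pySetD ans m (PySem.List.pyGetD ans (m + 1) 0)
          else ans) = ans.set m.toNat (PySem.List.pyGetD ans (m + 1) 0) := by
        rw [if_pos (by simpa using hcond), PySem.List.pySetD_of_nonneg _ _ hm0]
      set v := PySem.List.pyGetD ans (m + 1) 0 with hv
      rw [hstep] at hr
      have hvval : v = ans[m.toNat + 1]'(by omega) := by
        rw [hv, PySem.List.pyGetD_eq_getElem _ _ (by omega) (by omega)]
        congr 1
        omega
      obtain ⟨L, H2, H3⟩ := ih (m - 1) (ans.set m.toNat v) r
        (by rw [List.length_set]; exact hlen) (by omega) (by omega) hr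
      refine ⟨L, ?_, ?_⟩
      · intro i hi
        rw [H2 i (by omega), List.getElem?_set_ne (by omega)]
      · intro i hi
        rcases Nat.lt_or_ge i m.toNat with hlt | hge
        · rw [H3 i (by omega), List.getElem?_set_ne (by omega)]
        · have hieq : i = m.toNat := by omega
          subst hieq
          have hcond' : PySem.List.pyGetD g ((m.toNat : Int) + 1) 0 = 0 := by
            have he : ((m.toNat : Int)) = m := by omega
            rw [he]; exact hcond
          rw [if_pos hcond']
          rw [H2 m.toNat (by omega), H2 (m.toNat + 1) (by omega)]
          rw [List.getElem?_set_self (by omega), List.getElem?_set_ne (by omega)]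
          rw [List.getElem?_eq_getElem (by omega)]
          exact congrArg some hvval
    · -- no-op step
      have hstep : (if PySem.List.pyGetD g (m + 1) 0 == 0
          then PySem.List.pySetD ans m (PySem.List.pyGetD ans (m + 1) 0)
          else ans) = ans := by
        rw [if_neg (by simpa using hcond)]
      rw [hstep] at hr
      obtain ⟨L, H2, H3⟩ := ih (m - 1) ans r hlen (by omega) (by omega) hr
      refine ⟨L, ?_, ?_⟩
      · intro i hi
        exact H2 i (by omega)
      · intro i hi
        rcases Nat.lt_or_ge i m.toNat with hlt | hge
        · exact H3 i (by omega)
        · have hieq : i = m.toNat := by omega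
          subst hieq
          have hcond' : ¬ PySem.List.pyGetD g ((m.toNat : Int) + 1) 0 = 0 := by
            have he : ((m.toNat : Int)) = m := by omega
            rw [he]; exact hcond
          rw [if_neg hcond']
          exact H2 m.toNat (by omega)

theorem bsum_eq (b : List (Int × Int)) (s : Int) (h : ∀ q ∈ b, q.1 = 0) :
    b.foldl (fun s q => s + q.2) s = b.foldl (fun s q => if q.1 == 1 then q.2 else s + q.2) s := by
  induction b generalizing s with
  | nil => rfl
  | cons q r ih =>
    simp only [List.foldl_cons]
    rw [if_neg (by simp [h q (List.mem_cons_self)]), ih _ (fun p hp => h p (List.mem_cons_of_mem _ hp))]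

theorem altLoop_eq (l : List (Int × Int)) :
    ∀ (out : List Int) (run : Int) (k : Nat),
    altLoop l out run k =
      out ++ List.replicate (k + (altSplit l).1.length)
          ((altSplit l).1.foldl (fun s q => s + q.2) run)
        ++ gsum (altSplit l).2 ((altSplit l).1.foldl (fun s q => s + q.2) run) := by
  induction l with
  | nil => intro out run k; simp [altLoop, altSplit, gsum]
  | cons q qs ih =>
    intro out run k
    simp only [altLoop, altSplit]
    by_cases hq : q.1 == 0
    · rw [if_pos hq, if_pos hq, ih]
      simp only [List.foldl_cons, List.length_cons]
      rw [show k + ((altSplit qs).1.length + 1) = k + 1 + (altSplit qs).1.length from by omega]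
    · rw [if_neg hq, if_neg hq, ih]
      simp only [List.foldl_nil, List.length_nil, Nat.add_zero]
      rw [gsum]
      have hz := altSplit_fst_zero qs
      have e : sfin (q :: (altSplit qs).1) run =
          (altSplit qs).1.foldl (fun s p => s + p.2) (if q.1 == 1 then q.2 else run + q.2) := by
        simp only [sfin, List.foldl_cons]
        rw [← bsum_eq _ _ hz]
      rw [← e]
      simp [List.append_assoc, Nat.add_comm]

theorem alt_eq_gsum (g x : List Int) : GroupSum_plain_alt g x = gsum (g.zip x) 0 := by
  cases h : g.zip x with
  | nil => simp only [GroupSum_plain_alt, h]; rw [gsum]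
  | cons p rest =>
    simp only [GroupSum_plain_alt, h]
    rw [altLoop_eq, gsum]
    have hz := altSplit_fst_zero rest
    have e : sfin (p :: (altSplit rest).1) 0 =
        (altSplit rest).1.foldl (fun s q => s + q.2) (if p.1 == 1 then p.2 else 0 + p.2) := by
      simp only [sfin, List.foldl_cons]
      rw [← bsum_eq _ _ hz]
    rw [← e]
    simp [Nat.add_comm]

theorem pre_hc (g x : List Int) (hpre : Pre_GroupSum_plain g x) :
    ∀ i : Nat, (i : Int) ≤ (g.length : Int) - 2 →
      PySem.List.pyGetD g ((i : Int) + 1) 0 = 0 → i + 1 < x.length := by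
  intro i hle hz
  by_contra hge
  have hlt : i + 1 < g.length := by omega
  rw [pyGetD_succ g i hlt] at hz
  have hd : max x.length 1 ≤ i + 1 := by omega
  have hj : i + 1 - max x.length 1 < (g.drop (max x.length 1)).length := by
    rw [List.length_drop]; omega
  have hget := List.getElem_drop (xs := g) (i := max x.length 1)
      (j := i + 1 - max x.length 1) (h := hj)
  have e2 : max x.length 1 + (i + 1 - max x.length 1) = i + 1 := by omega
  have hmem : g[i + 1]'hlt ∈ g.drop (max x.length 1) := by
    have : (g.drop (max x.length 1))[i + 1 - max x.length 1]'hj = g[i + 1]'hlt := by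
      rw [hget]
      exact getElem_congr rfl e2 _
    rw [← this]
    exact List.getElem_mem hj
  have := (List.all_eq_true.mp hpre.2) _ hmem
  simp [hz] at this

theorem Ok_A (g x : List Int) (hpre : Pre_GroupSum_plain g x) :
    Ok (g.zip x) 0 (GroupSum_plain g x) := by
  obtain ⟨hle, hall⟩ := hpre
  have hzlen : (g.zip x).length = x.length := by rw [List.length_zip]; omega
  have hscanlen : (scanA (g.zip x) 0).length = x.length := by rw [scanA_length, hzlen]
  have hc := pre_hc g x ⟨hle, hall⟩
  have hA : GroupSum_plain g x =
      (PySem.List.pyRange ((g.length : Int) - 2) (-1) (-1)).foldl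
        (fun ans i =>
          if PySem.List.pyGetD g (i + 1) 0 == 0
          then PySem.List.pySetD ans i (PySem.List.pyGetD ans (i + 1) 0)
          else ans) (scanA (g.zip x) 0) := by
    unfold GroupSum_plain
    rw [forward_eq g x hle]
  by_cases hg : g.length = 0
  · -- empty lists: the backward range is empty
    have hz : g.zip x = [] := List.eq_nil_of_length_eq_zero (by omega)
    rw [hA, hz, PySem.List.pyRange_neg_one_eq_nil (by omega)]
    simp only [List.foldl_nil]
    exact ⟨by simp [scanA], fun i => by simp [scanA]⟩
  · have hg1 : 1 ≤ g.length := by omega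
    obtain ⟨L, H2, H3⟩ := backward_fold_char g x.length hc (g.length - 1)
      ((g.length : Int) - 2) (scanA (g.zip x) 0) (GroupSum_plain g x)
      hscanlen (by omega) (by omega) hA
    constructor
    · rw [L, hzlen]
    · intro i
      by_cases hi : (i : Int) ≤ (g.length : Int) - 2
      · rw [H3 i hi]
        have hglt : i + 1 < g.length := by omega
        by_cases hcond : PySem.List.pyGetD g ((i : Int) + 1) 0 = 0
        · have hin : i + 1 < x.length := hc i hi hcond
          have hpair : ((g.zip x)[i + 1]?).map Prod.fst = some 0 := by
            rw [List.getElem?_eq_getElem (by omega), Option.map_some]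
            rw [pyGetD_succ g i hglt] at hcond
            simp [List.getElem_zip, hcond]
          rw [if_pos hcond, if_pos hpair]
        · have hpair : ¬ ((g.zip x)[i + 1]?).map Prod.fst = some 0 := by
            intro hsome
            rcases Option.map_eq_some_iff.mp hsome with ⟨q, hq, hq0⟩
            have hin : i + 1 < (g.zip x).length := (List.getElem?_eq_some_iff.mp hq).1
            apply hcond
            rw [List.getElem?_eq_getElem hin] at hq
            have hqe : q = ((g.zip x)[i + 1]'hin) := (Option.some_inj.mp hq).symm
            rw [List.getElem_zip] at hqe
            rw [pyGetD_succ g i hglt, ← hq0, hqe]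
          rw [if_neg hcond, if_neg hpair]
      · -- beyond the backward loop: the next flag cannot be inside the zip
        have hge : (g.length : Int) - 2 < (i : Int) := by omega
        have hpair : ¬ ((g.zip x)[i + 1]?).map Prod.fst = some 0 := by
          intro hsome
          rcases Option.map_eq_some_iff.mp hsome with ⟨q, hq, _⟩
          have hin : i + 1 < (g.zip x).length := (List.getElem?_eq_some_iff.mp hq).1
          rw [hzlen] at hin
          omega
        rw [if_neg hpair, H2 i hge]

theorem final (g x : List Int) (hpre : Pre_GroupSum_plain g x) :
    GroupSum_plain g x = GroupSum_plain_alt g x := by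
  rw [alt_eq_gsum]
  exact Ok_unique (g.zip x) 0 _ _ (Ok_A g x hpre) (Ok_gsum (g.zip x) 0)

-- ===== VERDICT (by name: the statement is the Claim_ definition above) =====
theorem GroupSum_plain_spec : Claim_equal_GroupSum_plain := by
  intro g_plain x_plain _ hpre
  unfold Spec_GroupSum_plain
  exact final g_plain x_plain hpre
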